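-- pv_equiv track=rewrite | github.com/littlecold-Github/zhangfei-eat-douya | app.py | _add_no_image_warning
-- ===== SOURCE A (Python) =====
-- def _add_no_image_warning(content):
--     """在第一段后添加配图提示"""
--     lines = content.split('\n')
--     processed_content = []
--     first_paragraph_found = False
--
--     for line in lines:
--         line_stripped = line.strip()
--         processed_content.append(line)
--
--         # 找到第一个普通段落（非标题、非空行）
--         if not first_paragraph_found and line_stripped and not line_stripped.startswith('#'):
--             first_paragraph_found = True
--             # 在第一段后插入提示文字
--             processed_content.append('')
--             processed_content.append('**<span style="color:red;">请自行配图！！</span>**')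
--             processed_content.append('')
--
--     return '\n'.join(processed_content)
-- ===== SOURCE B (Python) =====
-- def _add_no_image_warning(content):
--     """在第一段后添加配图提示"""
--     lines = content.split('\n')
--     idx = next((i for i, line in enumerate(lines)
--                 if line.strip() and not line.strip().startswith('#')), None)
--     if idx is None:
--         return '\n'.join(lines)
--     return '\n'.join(lines[:idx + 1]
--                      + ['', '**<span style="color:red;">请自行配图！！</span>**', '']
--                      + lines[idx + 1:])
-- ===== Notes on version B (the rewrite author's own statement) =====
-- stated objective: simpler
-- what changed: B locates the insertion index with one next()/enumerate scan and splices the warning in by list slicing, instead of A's flag-and-accumulator loop that rebuilds the whole list.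
import Mathlib
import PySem

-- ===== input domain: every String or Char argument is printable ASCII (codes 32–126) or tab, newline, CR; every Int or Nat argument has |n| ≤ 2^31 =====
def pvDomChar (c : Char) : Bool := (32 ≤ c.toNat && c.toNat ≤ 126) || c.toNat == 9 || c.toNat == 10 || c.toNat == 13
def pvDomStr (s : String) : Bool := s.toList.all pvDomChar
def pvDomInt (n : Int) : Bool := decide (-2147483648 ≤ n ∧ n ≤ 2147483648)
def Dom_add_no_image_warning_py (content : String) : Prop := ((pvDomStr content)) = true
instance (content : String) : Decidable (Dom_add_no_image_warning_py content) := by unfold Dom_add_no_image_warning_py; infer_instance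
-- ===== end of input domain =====

-- B replaces A's flag-and-accumulator loop by a locate-then-splice decomposition (find the
-- insertion index, then concatenate slices); same cost, simpler structure. A=B everywhere.

def pvWarn : String := "**<span style=\"color:red;\">请自行配图！！</span>**"

-- ===== PORT A =====
-- A's for-loop: accumulator list + first_paragraph_found flag, line appended before the test.
def pvLoopA : List String → Bool → List String
  | [], _ => []
  | l :: ls, found =>
    let s := PySem.Str.strip l
    if !found && (s != "") && !(PySem.Str.startswith s "#") then
      l :: "" :: pvWarn :: "" :: pvLoopA ls true
    else
      l :: pvLoopA ls found

def add_no_image_warning_py (content : String) : String :=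
  PySem.Str.join "\n" (pvLoopA ((PySem.Chars.splitOn content.toList ['\n']).map String.ofList) false)

-- ===== PORT B =====
-- Source B's paragraph test (non-empty after strip, not starting with '#')
def pvPara (l : String) : Bool :=
  (PySem.Str.strip l != "") && !(PySem.Str.startswith (PySem.Str.strip l) "#")

def add_no_image_warning_py_alt (content : String) : String :=
  let lines := (PySem.Chars.splitOn content.toList ['\n']).map String.ofList
  match lines.findIdx? pvPara with
  | none => PySem.Str.join "\n" lines
  | some i => PySem.Str.join "\n"
      (lines.take (i + 1) ++ ["", pvWarn, ""] ++ lines.drop (i + 1))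

-- ===== PRECONDITION & SPEC =====
def Spec_add_no_image_warning_py (content : String) (out : String) : Prop := out = add_no_image_warning_py_alt content
instance (content : String) (out : String) : Decidable (Spec_add_no_image_warning_py content out) := by unfold Spec_add_no_image_warning_py; infer_instance

-- ===== CLAIM (what is proved, stated in full; the proofs are below) =====
def Claim_equal_add_no_image_warning_py : Prop := ∀ (content : String), Dom_add_no_image_warning_py content → Spec_add_no_image_warning_py content (add_no_image_warning_py content)

-- ===== LEMMAS AND PROOFS =====

theorem pvLoopA_true (ls : List String) : pvLoopA ls true = ls := by
  induction ls with
  | nil => rfl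
  | cons l ls ih => simp [pvLoopA, ih]

theorem pvLoopA_cons (l : String) (ls : List String) :
    pvLoopA (l :: ls) false =
      if pvPara l then l :: "" :: pvWarn :: "" :: pvLoopA ls true
      else l :: pvLoopA ls false := by
  simp only [pvLoopA, pvPara, Bool.not_false, Bool.true_and]
  rfl

theorem pvLoopA_false (ls : List String) :
    pvLoopA ls false =
      (match ls.findIdx? pvPara with
       | none => ls
       | some i => ls.take (i + 1) ++ ["", pvWarn, ""] ++ ls.drop (i + 1)) := by
  induction ls with
  | nil => rfl
  | cons l ls ih =>
    rw [pvLoopA_cons, List.findIdx?_cons]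
    by_cases h : pvPara l = true
    · simp [h, pvLoopA_true]
    · simp only [h, Bool.false_eq_true, if_false, ih]
      cases hf : ls.findIdx? pvPara <;> simp

-- ===== VERDICT (by name: the statement is the Claim_ definition above) =====
theorem add_no_image_warning_py_spec : Claim_equal_add_no_image_warning_py := by
  intro content _
  unfold Spec_add_no_image_warning_py add_no_image_warning_py add_no_image_warning_py_alt
  rw [pvLoopA_false]
  cases h : (List.map String.ofList (PySem.Chars.splitOn content.toList ['\n'])).findIdx? pvPara <;> simp [h]
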